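-- pv_equiv track=rewrite | github.com/cawp99/N-en-raya-3D | verificaciones.py | verificacion_diagonal_inversa
-- ===== SOURCE A (Python) =====
-- from typing import List
--
-- def verificacion_diagonal_inversa(matriz:List[List[int]])->bool:
--     """
--     Una función que verifica si la diagonal secundaria (inversa) en una matriz tiene
--     todas sus entradas iguales.
--
--     ### Argumentos
--     * `matriz`: Una matriz cuadrada de enteros
--
--     ### Retorno
--     bool: True si la diagonal secundaria tiene todas las entradas iguales. False
--     en caso contrario
--     """
--
--     comparar = 3 #valor base
--     for i in range(len(matriz)):
--         if matriz[len(matriz)-1-i][i] != 3: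
--             comparar = matriz[len(matriz)-1-i][i]
--             break
--
--     for i in range(1,len(matriz)):
--         if matriz[len(matriz)-1-i][i] == 3:
--             pass
--         elif matriz[len(matriz)-1-i][i] != comparar:
--             return False
--
--     return True
-- ===== SOURCE B (Python) =====
-- def verificacion_diagonal_inversa(matriz):
--     n = len(matriz)
--     vals = set()
--     for i in range(n):
--         v = matriz[n - 1 - i][i]
--         if v != 3:
--             vals.add(v)
--     return len(vals) <= 1
-- ===== Notes on version B (the rewrite author's own statement) =====
-- stated objective: simpler
-- what changed: Replaces the two loops (find a reference value, then compare every other non-3 entry against it with early return) by a single pass that collects the distinct non-3 anti-diagonal values in a set and returns len(vals) <= 1; Pre_ excludes ragged/non-square matrices where an anti-diagonal index is out of range: there A may raise IndexError or return False early via its early-return, while B, having no early exit, raises IndexError.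
-- outside the precondition, e.g. on verificacion_diagonal_inversa([[], [192, 2, 2], [1, 3, 3040], [6, 1, 2], [2, 6]]): A returns False, B raises IndexError
import Mathlib
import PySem

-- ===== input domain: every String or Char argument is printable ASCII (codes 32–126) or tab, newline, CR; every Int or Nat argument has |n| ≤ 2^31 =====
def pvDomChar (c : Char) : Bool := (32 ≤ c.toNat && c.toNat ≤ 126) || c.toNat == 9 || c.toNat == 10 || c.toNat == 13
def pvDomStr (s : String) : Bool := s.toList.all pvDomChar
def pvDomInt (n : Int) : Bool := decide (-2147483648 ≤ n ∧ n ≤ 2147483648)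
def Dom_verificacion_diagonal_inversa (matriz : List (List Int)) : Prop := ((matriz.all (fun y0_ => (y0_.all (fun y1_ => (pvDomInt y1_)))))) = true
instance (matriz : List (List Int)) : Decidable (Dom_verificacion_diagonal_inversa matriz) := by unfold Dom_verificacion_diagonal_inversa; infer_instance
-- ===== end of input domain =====

-- B changes the two-loop reference-value scan into one pass that collects the distinct
-- non-3 anti-diagonal values in a set and checks its size is ≤ 1 (different decomposition,
-- same cost). Equivalence is on Pre_ (anti-diagonal entries exist; elsewhere Python raises).

-- ===== PORT A =====
-- matriz[len(matriz)-1-i][i]  (total form; Pre_ guarantees the indices are in range)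
def vdiEntry (matriz : List (List Int)) (i : Nat) : Int :=
  (PySem.List.pyGet? ((PySem.List.pyGet? matriz ((matriz.length : Int) - 1 - (i : Int))).getD []) (i : Int)).getD 0

-- first loop of A: first non-3 entry on the anti-diagonal, default 3, with break
def vdiFirst (matriz : List (List Int)) : List Nat → Int
  | [] => 3
  | i :: rest => if vdiEntry matriz i ≠ 3 then vdiEntry matriz i else vdiFirst matriz rest

-- second loop of A: pass on 3, return False on a non-3 entry ≠ comparar
def vdiCheck (matriz : List (List Int)) (comparar : Int) : List Nat → Bool
  | [] => true
  | i :: rest =>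
      if vdiEntry matriz i = 3 then vdiCheck matriz comparar rest
      else if vdiEntry matriz i ≠ comparar then false
      else vdiCheck matriz comparar rest

def verificacion_diagonal_inversa (matriz : List (List Int)) : Bool :=
  let comparar := vdiFirst matriz (List.range matriz.length)
  vdiCheck matriz comparar ((List.range matriz.length).drop 1)  -- range(1, len(matriz))

-- ===== PORT B =====
def verificacion_diagonal_inversa_alt (matriz : List (List Int)) : Bool :=
  let vals : PySem.Set Int :=
    (List.range matriz.length).foldl
      (fun s i =>
        let v := vdiEntry matriz i
        if v ≠ 3 then PySem.Set.add s v else s)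
      PySem.Set.empty
  decide (vals.length ≤ 1)

-- ===== PRECONDITION & SPEC =====
-- Pre_ excludes ragged/non-square matrices on which some anti-diagonal access
-- matriz[len-1-i][i] is out of range: there Python A raises IndexError, or returns False
-- early through its early-return before reaching the bad index, while B's single pass
-- always raises IndexError.
def Pre_verificacion_diagonal_inversa (matriz : List (List Int)) : Prop :=
  ∀ i < matriz.length, i < (matriz.getD (matriz.length - 1 - i) []).length
instance (matriz : List (List Int)) : Decidable (Pre_verificacion_diagonal_inversa matriz) := by
  unfold Pre_verificacion_diagonal_inversa; infer_instance
def pvWitness_verificacion_diagonal_inversa : List (List Int) := [[1, 2], [3, 9]]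
def Spec_verificacion_diagonal_inversa (matriz : List (List Int)) (out : Bool) : Prop := out = verificacion_diagonal_inversa_alt matriz
instance (matriz : List (List Int)) (out : Bool) : Decidable (Spec_verificacion_diagonal_inversa matriz out) := by unfold Spec_verificacion_diagonal_inversa; infer_instance

-- ===== CLAIM (what is proved, stated in full; the proofs are below) =====
def Claim_equal_verificacion_diagonal_inversa : Prop := ∀ (matriz : List (List Int)), Dom_verificacion_diagonal_inversa matriz → Pre_verificacion_diagonal_inversa matriz → Spec_verificacion_diagonal_inversa matriz (verificacion_diagonal_inversa matriz)

-- ===== LEMMAS AND PROOFS =====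

-- abstract versions of the loops over the list of anti-diagonal VALUES
def vdiFirstV : List Int → Int
  | [] => 3
  | v :: rest => if v ≠ 3 then v else vdiFirstV rest

def vdiCheckV (comparar : Int) : List Int → Bool
  | [] => true
  | v :: rest =>
      if v = 3 then vdiCheckV comparar rest
      else if v ≠ comparar then false
      else vdiCheckV comparar rest

theorem vdiFirst_eq_V (matriz : List (List Int)) (idxs : List Nat) :
    vdiFirst matriz idxs = vdiFirstV (idxs.map (vdiEntry matriz)) := by
  induction idxs with
  | nil => rfl
  | cons i rest ih => simp [vdiFirst, vdiFirstV, ih]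

theorem vdiCheck_eq_V (matriz : List (List Int)) (c : Int) (idxs : List Nat) :
    vdiCheck matriz c idxs = vdiCheckV c (idxs.map (vdiEntry matriz)) := by
  induction idxs with
  | nil => rfl
  | cons i rest ih => simp [vdiCheck, vdiCheckV, ih]

theorem vdiFold_eq_ofList (matriz : List (List Int)) (idxs : List Nat) (s : PySem.Set Int) :
    idxs.foldl
      (fun s i => let v := vdiEntry matriz i; if v ≠ 3 then PySem.Set.add s v else s) s
      = ((idxs.map (vdiEntry matriz)).filter (fun v => v ≠ 3)).foldl PySem.Set.add s := by
  induction idxs generalizing s with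
  | nil => rfl
  | cons i rest ih =>
      simp only [List.foldl_cons, List.map_cons, List.filter_cons]
      by_cases h : vdiEntry matriz i = 3
      · simpa [h] using ih s
      · simpa [h] using ih (PySem.Set.add s (vdiEntry matriz i))

theorem vdiCheckV_iff (c : Int) (l : List Int) :
    vdiCheckV c l = true ↔ ∀ v ∈ l, v ≠ 3 → v = c := by
  induction l with
  | nil => simp [vdiCheckV]
  | cons v rest ih =>
      by_cases h : v = 3
      · simp [vdiCheckV, h, ih]
      · by_cases h2 : v = c <;> simp [vdiCheckV, h, h2, ih]

theorem vdiFirstV_eq_headD (l : List Int) :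
    vdiFirstV l = (l.filter (fun v => v ≠ 3)).headD 3 := by
  induction l with
  | nil => rfl
  | cons v rest ih =>
      by_cases h : v = 3 <;> simp [vdiFirstV, h, ih]

theorem set_len_le_one_iff (xs : List Int) :
    (PySem.Set.ofList xs).length ≤ 1 ↔ ∀ a ∈ xs, ∀ b ∈ xs, a = b := by
  constructor
  · intro h a ha b hb
    rw [← PySem.Set.mem_ofList (xs := xs)] at ha hb
    match hs : PySem.Set.ofList xs with
    | [] => rw [hs] at ha; simp at ha
    | [x] => rw [hs] at ha hb; simp at ha hb; omega
    | x :: y :: t => rw [hs] at h; simp at h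
  · intro h
    match hs : PySem.Set.ofList xs with
    | [] => simp
    | [x] => simp
    | x :: y :: t =>
      exfalso
      have hnd := PySem.Set.nodup_ofList (xs := xs)
      rw [hs] at hnd
      have hx : x ∈ xs := by
        rw [← PySem.Set.mem_ofList (xs := xs), hs]; simp
      have hy : y ∈ xs := by
        rw [← PySem.Set.mem_ofList (xs := xs), hs]; simp
      have := h x hx y hy
      simp [this] at hnd

-- the abstract core: A's two loops equal B's set-size test, on any value list
theorem core_eq (l : List Int) :
    vdiCheckV (vdiFirstV l) l = decide (((l.filter (fun v => v ≠ 3)).foldl PySem.Set.add PySem.Set.empty).length ≤ 1) := by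
  have hfold : ((l.filter (fun v => v ≠ 3)).foldl PySem.Set.add PySem.Set.empty)
      = PySem.Set.ofList (l.filter (fun v => v ≠ 3)) :=
    (PySem.Set.ofList_eq_foldl _).symm
  rw [hfold]
  cases hb : vdiCheckV (vdiFirstV l) l with
  | false =>
    symm
    rw [decide_eq_false_iff_not, set_len_le_one_iff]
    intro hall
    have : vdiCheckV (vdiFirstV l) l = true := by
      rw [vdiCheckV_iff, vdiFirstV_eq_headD]
      intro v hv hv3
      have hvf : v ∈ l.filter (fun v => v ≠ 3) := by
        simp [List.mem_filter, hv, hv3]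
      match hf : l.filter (fun v => v ≠ 3) with
      | [] => rw [hf] at hvf; simp at hvf
      | h :: t =>
        have hh : h ∈ l.filter (fun v => v ≠ 3) := by rw [hf]; simp
        rw [hf]
        exact hall v hvf h hh
    rw [this] at hb; exact (Bool.false_ne_true hb.symm).elim
  | true =>
    symm
    rw [vdiCheckV_iff, vdiFirstV_eq_headD] at hb
    rw [decide_eq_true_eq, set_len_le_one_iff]
    intro a ha b hc
    rw [List.mem_filter] at ha hc
    have h3a : a ≠ 3 := by simpa using ha.2
    have h3b : b ≠ 3 := by simpa using hc.2
    have hha := hb a ha.1 h3a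
    have hhb := hb b hc.1 h3b
    rw [hha, hhb]

theorem range_head_skip (matriz : List (List Int)) (c : Int) (i : Nat) (rest : List Nat) (hc : c = vdiFirst matriz (i :: rest)) :
    vdiCheck matriz c (i :: rest) = vdiCheck matriz c rest := by
  by_cases h : vdiEntry matriz i = 3
  · simp [vdiCheck, h]
  · have : c = vdiEntry matriz i := by simp [vdiFirst, h] at hc; exact hc
    simp [vdiCheck, h, this]

-- ===== VERDICT (by name: the statement is the Claim_ definition above) =====
theorem verificacion_diagonal_inversa_spec : Claim_equal_verificacion_diagonal_inversa := by
  intro matriz _ _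
  unfold Spec_verificacion_diagonal_inversa verificacion_diagonal_inversa verificacion_diagonal_inversa_alt
  rw [vdiFold_eq_ofList]
  match hn : List.range matriz.length with
  | [] => simp [vdiCheck]
  | i :: rest =>
    have hskip := range_head_skip matriz (vdiFirst matriz (i :: rest)) i rest rfl
    simp only [List.drop_succ_cons, List.drop_zero]
    rw [← hskip, vdiCheck_eq_V, vdiFirst_eq_V, core_eq]
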